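-- pv_equiv track=rewrite | github.com/ireneweng/calculator | calculator.py | get_base_expression
-- ===== SOURCE A (Python) =====
-- def get_base_expression(input: str) -> str:
--     """Gets innermost expression inside parentheses."""
--     start, end = 0, len(input)
--     for i in range(len(input)):
--         char = input[i]
--         if char == "(":
--             start = i
--         elif char == ")":
--             end = i + 1
--             break
--     return input[start:end]
-- ===== SOURCE B (Python) =====
-- def get_base_expression(input: str) -> str:
--     """Gets innermost expression inside parentheses."""
--     close = input.find(")")
--     end = len(input) if close == -1 else close + 1
--     start = 0
--     for i in range(end - 1, -1, -1):
--         if input[i] == "(":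
--             start = i
--             break
--     return input[start:end]
-- ===== Notes on version B (the rewrite author's own statement) =====
-- stated objective: idiomatic
-- what changed: Replaces A's single stateful forward scan (tracking start/end with a break) by a forward str.find for the first ')' followed by a backward scan over the prefix for the nearest '(' before it.
import Mathlib
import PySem

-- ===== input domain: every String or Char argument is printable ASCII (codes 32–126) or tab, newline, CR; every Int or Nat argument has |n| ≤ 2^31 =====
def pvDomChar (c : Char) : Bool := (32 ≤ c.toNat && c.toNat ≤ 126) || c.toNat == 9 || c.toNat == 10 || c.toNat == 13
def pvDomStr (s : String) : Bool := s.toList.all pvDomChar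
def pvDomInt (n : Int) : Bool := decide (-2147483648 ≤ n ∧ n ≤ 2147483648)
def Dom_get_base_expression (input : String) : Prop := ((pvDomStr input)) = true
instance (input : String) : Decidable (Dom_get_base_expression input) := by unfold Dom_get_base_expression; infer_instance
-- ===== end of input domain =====

-- B replaces A's single stateful forward scan by a forward find for the first ')'
-- plus a backward scan for the nearest '(' before it (idiomatic decomposition, same cost).


-- ===== PORT A =====
-- A's for-loop over range(len(input)) with state (start, end) and break at the first ')'.
def pyALoop : List Char → Nat → Nat → Nat → Nat × Nat
  | [], _, start, end_ => (start, end_)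
  | c :: cs, i, start, end_ =>
    if c = '(' then pyALoop cs (i + 1) i end_
    else if c = ')' then (start, i + 1)
    else pyALoop cs (i + 1) start end_

def get_base_expression (input : String) : String :=
  let cs := input.toList
  let se := pyALoop cs 0 0 cs.length
  String.ofList (PySem.List.slice cs (some (se.1 : Int)) (some (se.2 : Int)))

-- ===== PORT B =====
-- the backward loop 'for i in range(end - 1, -1, -1): if input[i] == "(": start = i; break'
-- (argument = number of positions still to inspect, i.e. current i + 1)
def rscanOpen (cs : List Char) : Nat → Nat
  | 0 => 0
  | i + 1 => if cs[i]? = some '(' then i else rscanOpen cs i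

def get_base_expression_alt (input : String) : String :=
  let cs := input.toList
  let close := PySem.Str.find input ")"
  let e : Nat := if close = -1 then cs.length else close.toNat + 1
  let s := rscanOpen cs e
  String.ofList (PySem.List.slice cs (some (s : Int)) (some (e : Int)))

-- ===== PRECONDITION & SPEC =====
def Spec_get_base_expression (input : String) (out : String) : Prop := out = get_base_expression_alt input
instance (input : String) (out : String) : Decidable (Spec_get_base_expression input out) := by unfold Spec_get_base_expression; infer_instance

-- ===== CLAIM (what is proved, stated in full; the proofs are below) =====
def Claim_equal_get_base_expression : Prop := ∀ (input : String), Dom_get_base_expression input → Spec_get_base_expression input (get_base_expression input)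

-- ===== LEMMAS AND PROOFS =====

-- first index of ')' (proof-side characterisation)
def fc : List Char → Option Nat
  | [] => none
  | c :: cs => if c = ')' then some 0 else (fc cs).map (· + 1)

-- last index of '(' (proof-side characterisation)
def lo : List Char → Option Nat
  | [] => none
  | c :: cs =>
    match lo cs with
    | some j => some (j + 1)
    | none => if c = '(' then some 0 else none

theorem lo_append (l : List Char) (c : Char) :
    lo (l ++ [c]) = if c = '(' then some l.length else lo l := by
  induction l with
  | nil => by_cases hc : c = '(' <;> simp [lo, hc]
  | cons a l ih =>
    by_cases hc : c = '('
    · subst hc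
      simp [List.cons_append, lo, ih]
    · simp only [List.cons_append, lo, ih, if_neg hc]

theorem fc_some (cs : List Char) (c : Nat) (h : fc cs = some c) :
    cs[c]? = some ')' ∧ ∀ j < c, cs[j]? ≠ some ')' := by
  induction cs generalizing c with
  | nil => simp [fc] at h
  | cons a cs ih =>
    by_cases ha : a = ')'
    · simp [fc, ha] at h; subst h; simp [ha]
    · simp [fc, ha] at h
      obtain ⟨c', hc', rfl⟩ := h
      obtain ⟨h1, h2⟩ := ih c' hc'
      refine ⟨by simpa using h1, ?_⟩
      intro j hj
      cases j with
      | zero => simpa using ha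
      | succ j => simpa using h2 j (by omega)

theorem fc_none (cs : List Char) (h : fc cs = none) : ')' ∉ cs := by
  induction cs with
  | nil => simp
  | cons a cs ih =>
    by_cases ha : a = ')'
    · simp [fc, ha] at h
    · simp [fc, ha] at h; simp [ha, ih h]
      exact fun hh => ha hh.symm

theorem singleton_prefix_drop (cs : List Char) (j : Nat) (a : Char) :
    [a] <+: cs.drop j ↔ cs[j]? = some a := by
  constructor
  · rintro ⟨t, ht⟩
    have h0 : (cs.drop j)[0]? = some a := by rw [← ht]; simp
    simpa using h0
  · intro h
    have hj : j < cs.length := (List.getElem?_eq_some_iff.mp h).1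
    refine ⟨cs.drop (j + 1), ?_⟩
    have hd : cs.drop j = a :: cs.drop (j + 1) := by
      rw [List.drop_eq_getElem_cons hj]
      have ha : cs[j] = a := by simpa [List.getElem?_eq_getElem hj] using h
      rw [ha]
    simp [hd]

theorem find_eq_fc (s : List Char) :
    PySem.Chars.find s [')'] = match fc s with | some c => (c : Int) | none => -1 := by
  cases h : fc s with
  | none =>
    simp only
    rw [PySem.Chars.find_eq_neg_one_iff s [')']]
    intro hinf
    exact fc_none s h (hinf.mem (by simp))
  | some c =>
    simp only
    obtain ⟨h1, h2⟩ := fc_some s c h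
    have hlt : c < s.length := (List.getElem?_eq_some_iff.mp h1).1
    have hdrop : s.drop c = ')' :: s.drop (c + 1) := by
      rw [List.drop_eq_getElem_cons hlt]
      have ha : s[c] = ')' := by simpa [List.getElem?_eq_getElem hlt] using h1
      rw [ha]
    have hmem : [')'] <:+: s := by
      refine ⟨s.take c, s.drop (c + 1), ?_⟩
      conv_rhs => rw [← List.take_append_drop c s, hdrop]
      simp
    have hne : PySem.Chars.find s [')'] ≠ -1 := (PySem.Chars.find_ne_neg_one_iff s [')']).mpr hmem
    have hge : -1 ≤ PySem.Chars.find s [')'] := PySem.Chars.neg_one_le_find s [')']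
    have hnn : 0 ≤ PySem.Chars.find s [')'] := by omega
    obtain ⟨hp, hmin⟩ := PySem.Chars.find_spec hnn
    have hfc : s[(PySem.Chars.find s [')']).toNat]? = some ')' :=
      (singleton_prefix_drop s _ _).mp hp
    have h3 : ¬ (PySem.Chars.find s [')']).toNat < c := fun hlt =>
      h2 _ hlt hfc
    have h4 : ¬ c < (PySem.Chars.find s [')']).toNat := fun hlt =>
      hmin c hlt ((singleton_prefix_drop s c ')').mpr h1)
    omega

-- A's loop computes (last '(' before the first ')', that ')' + 1), shifted by i.
theorem pyALoop_eq (cs : List Char) : ∀ (i s e0 : Nat),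
    pyALoop cs i s e0 =
      match fc cs with
      | some c => ((lo (cs.take c)).elim s (i + ·), i + c + 1)
      | none => ((lo cs).elim s (i + ·), e0) := by
  induction cs with
  | nil => intro i s e0; simp [pyALoop, fc, lo]
  | cons a cs ih =>
    intro i s e0
    by_cases ho : a = '('
    · subst ho
      simp only [pyALoop, if_pos rfl, ih (i + 1) i e0, fc]
      simp only [if_neg (by decide : ¬ ('(' = ')'))]
      cases h : fc cs with
      | some c =>
        simp only [Option.map_some, List.take_succ_cons]
        cases hl : lo (cs.take c) <;> simp [lo, hl] <;> omega
      | none =>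
        simp only [Option.map_none]
        cases hl : lo cs <;> simp [lo, hl] <;> omega
    · by_cases hc : a = ')'
      · subst hc
        simp [pyALoop, fc, lo] <;> omega
      · simp only [pyALoop, if_neg ho, if_neg hc, ih (i + 1) s e0, fc, if_neg hc]
        cases h : fc cs with
        | some c =>
          simp only [Option.map_some, List.take_succ_cons]
          cases hl : lo (cs.take c) <;> simp [lo, hl, ho] <;> omega
        | none =>
          simp only [Option.map_none]
          cases hl : lo cs <;> simp [lo, hl, ho] <;> omega

-- B's backward scan is the last '(' among the first e characters (default 0).
theorem rscanOpen_eq (cs : List Char) : ∀ (e : Nat),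
    rscanOpen cs e = (lo (cs.take e)).getD 0 := by
  intro e
  induction e with
  | zero => simp [rscanOpen, lo]
  | succ e ih =>
    by_cases he : e < cs.length
    · have ht : cs.take (e + 1) = cs.take e ++ [cs[e]] := List.take_succ_eq_append_getElem he
      simp only [rscanOpen, ht, lo_append]
      by_cases hg : cs[e] = '('
      · simp [hg, List.getElem?_eq_getElem he, List.length_take, Nat.min_eq_left (Nat.le_of_lt he)]
      · rw [if_neg hg, List.getElem?_eq_getElem he, ih]
        simp [hg]
    · have h1 : cs.take (e + 1) = cs := List.take_of_length_le (by omega)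
      have h2 : cs.take e = cs := List.take_of_length_le (by omega)
      simp only [rscanOpen, List.getElem?_eq_none (show cs.length ≤ e by omega)]
      rw [ih, h1, h2]
      simp

theorem fc_some_lt (cs : List Char) (c : Nat) (h : fc cs = some c) : c < cs.length := by
  have := (fc_some cs c h).1
  exact (List.getElem?_eq_some_iff.mp this).1

-- ===== VERDICT (by name: the statement is the Claim_ definition above) =====
theorem get_base_expression_spec : Claim_equal_get_base_expression := by
  intro input _
  unfold Spec_get_base_expression get_base_expression get_base_expression_alt
  have hlit : (")" : String).toList = [')'] := rfl
  simp only [PySem.Str.find_eq, hlit]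
  rw [find_eq_fc, pyALoop_eq, rscanOpen_eq]
  cases h : fc input.toList with
  | none =>
    rw [if_pos rfl, List.take_length]
    cases h2 : lo input.toList <;> simp [Option.elim, Option.getD]
  | some c =>
    have hc : ¬ ((c : Int) = -1) := by omega
    rw [if_neg hc, Int.toNat_natCast]
    have hlt := fc_some_lt input.toList c h
    have ht : input.toList.take (c + 1) = input.toList.take c ++ [input.toList[c]] :=
      List.take_succ_eq_append_getElem hlt
    have hg : input.toList[c] = ')' := by
      have := (fc_some input.toList c h).1
      simpa [List.getElem?_eq_getElem hlt] using this
    rw [ht, hg, lo_append, if_neg (by decide)]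
    cases h2 : lo (input.toList.take c) <;> simp [h2, Option.elim, Option.getD]
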